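-- pv_equiv track=rewrite | github.com/sharathcherukuri/python-learning | OddEvenSubArray_Efficient.py | OddEvenSArray_E
-- ===== SOURCE A (Python) =====
-- def OddEvenSArray_E(a):
--
--     n = len(a)
--     curr = 1
--     res = 1
--
--     for j in range(1,n):
--
--         if (a[j-1]%2 == 0 and a[j]%2 != 0) or (a[j-1]%2 != 0 and a[j]%2 == 0):
--             curr +=1
--             res = max(res,curr)
--
--         else:
--             curr = 1
--     return res
-- ===== SOURCE B (Python) =====
-- def OddEvenSArray_E(a):
--     n = len(a)
--     breaks = [j for j in range(1, n) if a[j - 1] % 2 == a[j] % 2]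
--     bounds = [0] + breaks + [n]
--     return max(max(hi - lo for lo, hi in zip(bounds, bounds[1:])), 1)
-- ===== Notes on version B (the rewrite author's own statement) =====
-- stated objective: alternative
-- what changed: Replaces A's running counter with in-loop resets by a breakpoint scan: collect the indices where adjacent elements share parity, form the boundary list of zero, the break points and the length, and return the maximum consecutive difference floored at 1.
import Mathlib
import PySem

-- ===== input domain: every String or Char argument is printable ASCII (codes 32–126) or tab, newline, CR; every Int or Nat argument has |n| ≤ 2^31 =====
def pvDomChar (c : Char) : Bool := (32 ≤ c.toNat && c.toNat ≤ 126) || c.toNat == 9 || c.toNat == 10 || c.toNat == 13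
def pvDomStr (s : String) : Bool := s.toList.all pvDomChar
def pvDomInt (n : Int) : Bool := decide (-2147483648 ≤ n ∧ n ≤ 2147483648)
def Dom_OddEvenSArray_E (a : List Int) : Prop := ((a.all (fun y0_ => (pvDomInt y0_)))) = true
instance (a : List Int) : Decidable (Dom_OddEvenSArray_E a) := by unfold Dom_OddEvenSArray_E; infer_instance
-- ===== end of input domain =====

-- B replaces A's running counter with a breakpoint scan: collect the indices where two
-- neighbours share parity and read the answer off the gaps between consecutive boundaries
-- (objective: alternative decomposition, same O(n) cost).

-- ===== PORT A =====
-- loop body of A: state (curr, res), one step for loop index j;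
-- a[j-1], a[j] via pyGetD: exact, since j ∈ range(1, len(a)) keeps both indices in range
def pvStepA (a : List Int) (s : Int × Int) (j : Int) : Int × Int :=
  if (PySem.Int.mod (PySem.List.pyGetD a (j - 1) 0) 2 = 0 ∧ PySem.Int.mod (PySem.List.pyGetD a j 0) 2 ≠ 0) ∨
     (PySem.Int.mod (PySem.List.pyGetD a (j - 1) 0) 2 ≠ 0 ∧ PySem.Int.mod (PySem.List.pyGetD a j 0) 2 = 0)
  then (s.1 + 1, max s.2 (s.1 + 1))
  else (1, s.2)

def OddEvenSArray_E (a : List Int) : Int :=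
  ((PySem.List.pyRange 1 (a.length : Int)).foldl (pvStepA a) (1, 1)).2

-- ===== PORT B =====
-- break test of B's comprehension: a[j-1] % 2 == a[j] % 2 (indices in range as above)
def pvBr (a : List Int) (j : Int) : Bool :=
  PySem.Int.mod (PySem.List.pyGetD a (j - 1) 0) 2 == PySem.Int.mod (PySem.List.pyGetD a j 0) 2

-- 'foldl max 0' ports Python's max over the (always nonempty) diff list; exact since every diff is ≥ 0
def OddEvenSArray_E_alt (a : List Int) : Int :=
  let breaks := (PySem.List.pyRange 1 (a.length : Int)).filter (pvBr a)
  let bounds := 0 :: (breaks ++ [(a.length : Int)])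
  max (((bounds.zip bounds.tail).map (fun p => p.2 - p.1)).foldl max 0) 1

-- ===== PRECONDITION & SPEC =====
def Spec_OddEvenSArray_E (a : List Int) (out : Int) : Prop := out = OddEvenSArray_E_alt a
instance (a : List Int) (out : Int) : Decidable (Spec_OddEvenSArray_E a out) := by unfold Spec_OddEvenSArray_E; infer_instance

-- ===== CLAIM (what is proved, stated in full; the proofs are below) =====
def Claim_equal_OddEvenSArray_E : Prop := ∀ (a : List Int), Dom_OddEvenSArray_E a → Spec_OddEvenSArray_E a (OddEvenSArray_E a)

-- ===== LEMMAS AND PROOFS =====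

-- consecutive differences of a boundary list
def pvDiffs : List Int → List Int
  | b :: c :: t => (c - b) :: pvDiffs (c :: t)
  | _ => []

-- max of a list, floored at 0
def pvMx (l : List Int) : Int := l.foldl max 0

def pvBreaks (a : List Int) (k : Int) : List Int :=
  (PySem.List.pyRange 1 k).filter (pvBr a)

lemma pvZipMap (L : List Int) :
    (L.zip L.tail).map (fun p => p.2 - p.1) = pvDiffs L := by
  match L with
  | [] => rfl
  | [b] => rfl
  | b :: c :: t =>
    simp only [List.tail_cons, List.zip_cons_cons, List.map_cons, pvDiffs]
    exact congrArg _ (pvZipMap (c :: t))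

lemma pvMx_append (X : List Int) (y : Int) : pvMx (X ++ [y]) = max (pvMx X) y := by
  simp [pvMx, List.foldl_append]

lemma pvDiffs_append (L : List Int) (x : Int) (h : L ≠ []) :
    pvDiffs (L ++ [x]) = pvDiffs L ++ [x - L.getLastD 0] := by
  match L with
  | [] => exact absurd rfl h
  | [b] => simp [pvDiffs]
  | b :: c :: t =>
    have ih := pvDiffs_append (c :: t) x (by simp)
    rw [List.getLastD_cons] at ih
    simp only [List.cons_append, pvDiffs, List.getLastD_cons]
    exact congrArg _ ih

lemma pvGetLastD_mem (l : List Int) (d : Int) : l.getLastD d = d ∨ l.getLastD d ∈ l := by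
  match l with
  | [] => exact Or.inl rfl
  | b :: t =>
    right
    rw [List.getLastD_cons]
    rcases pvGetLastD_mem t b with h | h
    · rw [h]; exact List.mem_cons_self
    · exact List.mem_cons_of_mem _ h

lemma pvStepA_eq (a : List Int) (s : Int × Int) (j : Int) :
    pvStepA a s j = if pvBr a j then (1, s.2) else (s.1 + 1, max s.2 (s.1 + 1)) := by
  unfold pvStepA pvBr
  rw [PySem.Int.mod_eq_emod_of_pos (by omega), PySem.Int.mod_eq_emod_of_pos (by omega)]
  rcases Int.emod_two_eq (PySem.List.pyGetD a (j - 1) 0) with hp | hp <;>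
    rcases Int.emod_two_eq (PySem.List.pyGetD a j 0) with hc | hc <;>
      simp [hp, hc]

lemma pvBreaks_lt (a : List Int) (k : Int) (x : Int) (hx : x ∈ pvBreaks a k) : x < k := by
  unfold pvBreaks at hx
  have := List.mem_filter.mp hx
  exact (PySem.List.mem_pyRange_one.mp this.1).2

-- the loop invariant: after processing j = 1 .. k-1, curr measures the distance to the
-- last break point and res is the floored maximum gap of the boundary list closed at k
lemma pvInv (a : List Int) (k : Int) (h1 : 1 ≤ k) :
    (PySem.List.pyRange 1 k).foldl (pvStepA a) (1, 1) =
      (k - (0 :: pvBreaks a k).getLastD 0,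
       max 1 (pvMx (pvDiffs (0 :: (pvBreaks a k ++ [k]))))) := by
  rcases Int.le_iff_lt_or_eq.mp h1 with hlt | heq
  · -- k ≥ 2: peel the last index k-1
    have h1' : (1 : Int) ≤ k - 1 := by omega
    have hr : PySem.List.pyRange 1 k = PySem.List.pyRange 1 (k - 1) ++ [k - 1] := by
      have := PySem.List.pyRange_one_succ_right (a := 1) (b := k - 1) h1'
      simpa using this
    have hb : pvBreaks a k = pvBreaks a (k - 1) ++ if pvBr a (k - 1) then [k - 1] else [] := by
      unfold pvBreaks
      rw [hr, List.filter_append]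
      simp [List.filter_singleton]
    have ih := pvInv a (k - 1) h1'
    rw [hr, List.foldl_append, ih]
    simp only [List.foldl_cons, List.foldl_nil, pvStepA_eq]
    set lb := (0 :: pvBreaks a (k - 1)).getLastD 0 with hlbdef
    have hlb_le : lb ≤ k - 1 := by
      rcases pvGetLastD_mem (0 :: pvBreaks a (k - 1)) 0 with h | h
      · omega
      · rcases List.mem_cons.mp h with h | h
        · omega
        · have := pvBreaks_lt a (k - 1) lb h; omega
    by_cases hbr : pvBr a (k - 1)
    · -- a break at k-1
      rw [if_pos hbr]
      rw [hb, if_pos hbr, Prod.mk.injEq]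
      refine ⟨?_, ?_⟩
      · rw [show (0 : Int) :: (pvBreaks a (k - 1) ++ [k - 1]) = (0 :: pvBreaks a (k - 1)) ++ [k - 1] by simp,
          List.getLastD_concat]
        omega
      · rw [show (0 : Int) :: (pvBreaks a (k - 1) ++ [k - 1] ++ [k]) = ((0 :: pvBreaks a (k - 1)) ++ [k - 1]) ++ [k] by simp,
          pvDiffs_append _ _ (by simp), List.getLastD_concat, pvMx_append,
          show ((0 : Int) :: pvBreaks a (k - 1)) ++ [k - 1] = (0 : Int) :: (pvBreaks a (k - 1) ++ [k - 1]) by simp]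
        omega
    · -- no break at k-1
      rw [if_neg hbr]
      rw [hb, if_neg hbr, List.append_nil, Prod.mk.injEq]
      rw [show (0 : Int) :: (pvBreaks a (k - 1) ++ [k]) = (0 :: pvBreaks a (k - 1)) ++ [k] by simp,
        show (0 : Int) :: (pvBreaks a (k - 1) ++ [k - 1]) = (0 :: pvBreaks a (k - 1)) ++ [k - 1] by simp,
        pvDiffs_append _ _ (by simp), pvDiffs_append _ _ (by simp), pvMx_append, pvMx_append, ← hlbdef]
      refine ⟨by omega, by omega⟩
  · -- k = 1: empty range
    rw [← heq]
    simp [pvBreaks, pvDiffs, pvMx]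
termination_by (k - 1).toNat
decreasing_by omega

-- ===== VERDICT (by name: the statement is the Claim_ definition above) =====
theorem OddEvenSArray_E_spec : Claim_equal_OddEvenSArray_E := by
  intro a _
  unfold Spec_OddEvenSArray_E
  simp only [OddEvenSArray_E, OddEvenSArray_E_alt, pvZipMap]
  by_cases h : a.length = 0
  · rw [h]
    norm_num [PySem.List.pyRange_one, pvDiffs, pvMx]
  · have h1 : (1 : Int) ≤ (a.length : Int) := by
      have : 1 ≤ a.length := Nat.one_le_iff_ne_zero.mpr h
      exact_mod_cast this
    rw [pvInv a _ h1]
    show max 1 (pvMx (pvDiffs (0 :: (pvBreaks a (a.length : Int) ++ [(a.length : Int)])))) = _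
    rw [pvBreaks]
    exact max_comm _ _
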